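-- pv_equiv track=rewrite | github.com/neel2003gar/project-ai | backend/analytics/services.py | _get_data_quality_recommendations
-- ===== SOURCE A (Python) =====
-- def _get_data_quality_recommendations(quality_score, issues):
--     """Generate data quality improvement recommendations"""
--     recommendations = []
--
--     if quality_score < 70:
--         recommendations.append("Consider data cleaning and preprocessing")
--     if quality_score < 50:
--         recommendations.append("Significant data quality issues detected - review data sources")
--
--     if any("missing data" in issue.lower() for issue in issues):
--         recommendations.append("Handle missing values through imputation or removal")
--     if any("duplicate" in issue.lower() for issue in issues):
--         recommendations.append("Remove or investigate duplicate records")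
--     if any("outlier" in issue.lower() for issue in issues):
--         recommendations.append("Investigate and handle outliers appropriately")
--
--     return recommendations
-- ===== SOURCE B (Python) =====
-- def _get_data_quality_recommendations(quality_score, issues):
--     """Generate data quality improvement recommendations (one pass over issues)"""
--     has_missing = has_duplicate = has_outlier = False
--     for issue in issues:
--         low = issue.lower()
--         has_missing = has_missing or "missing data" in low
--         has_duplicate = has_duplicate or "duplicate" in low
--         has_outlier = has_outlier or "outlier" in low
--     table = [
--         (quality_score < 70, "Consider data cleaning and preprocessing"),
--         (quality_score < 50, "Significant data quality issues detected - review data sources"),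
--         (has_missing, "Handle missing values through imputation or removal"),
--         (has_duplicate, "Remove or investigate duplicate records"),
--         (has_outlier, "Investigate and handle outliers appropriately"),
--     ]
--     return [msg for ok, msg in table if ok]
-- ===== Notes on version B (the rewrite author's own statement) =====
-- stated objective: simpler
-- what changed: Three independent any-scans of issues (each lowercasing every element again) are merged into a single pass that lowercases each element once and sets three flags, and the result is produced by filtering one (condition, message) table instead of five sequential append branches.
import Mathlib
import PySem

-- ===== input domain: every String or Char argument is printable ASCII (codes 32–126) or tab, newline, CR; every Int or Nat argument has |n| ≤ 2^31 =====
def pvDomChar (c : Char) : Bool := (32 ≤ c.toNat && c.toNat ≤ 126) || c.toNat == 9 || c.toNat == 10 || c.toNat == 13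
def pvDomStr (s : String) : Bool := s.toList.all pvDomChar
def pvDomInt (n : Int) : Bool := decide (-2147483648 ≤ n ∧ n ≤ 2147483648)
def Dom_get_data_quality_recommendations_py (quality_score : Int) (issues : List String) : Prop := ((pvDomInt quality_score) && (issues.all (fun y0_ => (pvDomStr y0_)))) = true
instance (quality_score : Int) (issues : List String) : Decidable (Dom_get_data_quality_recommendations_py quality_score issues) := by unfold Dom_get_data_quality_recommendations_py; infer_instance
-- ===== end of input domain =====

-- B merges A's three separate any-scans of `issues` into a single flag-building pass
-- and emits the result by filtering one (condition, message) table; objective: simpler.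

-- ===== PORT A =====
def get_data_quality_recommendations_py (quality_score : Int) (issues : List String) : List String :=
  let recommendations : List String := []
  let recommendations := if quality_score < 70 then recommendations ++ ["Consider data cleaning and preprocessing"] else recommendations
  let recommendations := if quality_score < 50 then recommendations ++ ["Significant data quality issues detected - review data sources"] else recommendations
  let recommendations := if issues.any (fun issue => PySem.Str.isIn "missing data" (PySem.Str.lower issue)) then recommendations ++ ["Handle missing values through imputation or removal"] else recommendations
  let recommendations := if issues.any (fun issue => PySem.Str.isIn "duplicate" (PySem.Str.lower issue)) then recommendations ++ ["Remove or investigate duplicate records"] else recommendations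
  let recommendations := if issues.any (fun issue => PySem.Str.isIn "outlier" (PySem.Str.lower issue)) then recommendations ++ ["Investigate and handle outliers appropriately"] else recommendations
  recommendations

-- ===== PORT B =====
def get_data_quality_recommendations_py_alt (quality_score : Int) (issues : List String) : List String :=
  let flags := issues.foldl (fun (f : Bool × Bool × Bool) issue =>
      let low := PySem.Str.lower issue
      (f.1 || PySem.Str.isIn "missing data" low,
       f.2.1 || PySem.Str.isIn "duplicate" low,
       f.2.2 || PySem.Str.isIn "outlier" low)) (false, false, false)
  let table : List (Bool × String) :=
    [(decide (quality_score < 70), "Consider data cleaning and preprocessing"),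
     (decide (quality_score < 50), "Significant data quality issues detected - review data sources"),
     (flags.1, "Handle missing values through imputation or removal"),
     (flags.2.1, "Remove or investigate duplicate records"),
     (flags.2.2, "Investigate and handle outliers appropriately")]
  (table.filter (fun p => p.1)).map (fun p => p.2)

-- ===== PRECONDITION & SPEC =====
def Spec_get_data_quality_recommendations_py (quality_score : Int) (issues : List String) (out : List String) : Prop := out = get_data_quality_recommendations_py_alt quality_score issues
instance (quality_score : Int) (issues : List String) (out : List String) : Decidable (Spec_get_data_quality_recommendations_py quality_score issues out) := by unfold Spec_get_data_quality_recommendations_py; infer_instance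

-- ===== CLAIM (what is proved, stated in full; the proofs are below) =====
def Claim_equal_get_data_quality_recommendations_py : Prop := ∀ (quality_score : Int) (issues : List String), Dom_get_data_quality_recommendations_py quality_score issues → Spec_get_data_quality_recommendations_py quality_score issues (get_data_quality_recommendations_py quality_score issues)

-- ===== LEMMAS AND PROOFS =====
theorem pv_flags_eq (issues : List String) (a b c : Bool) :
    issues.foldl (fun (f : Bool × Bool × Bool) issue =>
      let low := PySem.Str.lower issue
      (f.1 || PySem.Str.isIn "missing data" low,
       f.2.1 || PySem.Str.isIn "duplicate" low,
       f.2.2 || PySem.Str.isIn "outlier" low)) (a, b, c)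
    = (a || issues.any (fun i => PySem.Str.isIn "missing data" (PySem.Str.lower i)),
       b || issues.any (fun i => PySem.Str.isIn "duplicate" (PySem.Str.lower i)),
       c || issues.any (fun i => PySem.Str.isIn "outlier" (PySem.Str.lower i))) := by
  induction issues generalizing a b c with
  | nil => simp
  | cons x xs ih =>
      simp only [List.foldl_cons, List.any_cons]
      rw [ih]
      simp [Bool.or_assoc]

-- ===== VERDICT (by name: the statement is the Claim_ definition above) =====
theorem get_data_quality_recommendations_py_spec : Claim_equal_get_data_quality_recommendations_py := by
  intro quality_score issues _
  unfold Spec_get_data_quality_recommendations_py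
  unfold get_data_quality_recommendations_py get_data_quality_recommendations_py_alt
  rw [pv_flags_eq]
  by_cases h1 : quality_score < 70 <;> by_cases h2 : quality_score < 50 <;>
    cases hm : issues.any (fun i => PySem.Str.isIn "missing data" (PySem.Str.lower i)) <;>
    cases hd : issues.any (fun i => PySem.Str.isIn "duplicate" (PySem.Str.lower i)) <;>
    cases ho : issues.any (fun i => PySem.Str.isIn "outlier" (PySem.Str.lower i)) <;>
    simp [h1, h2, List.filter, List.map]
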